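-- pv_equiv track=rewrite | github.com/matiaszanolli/aerobiz-disasm | tools/translate_block.py | format_reglist
-- ===== SOURCE A (Python) =====
-- def format_reglist(regs):
--     """Format a register list for MOVEM in vasm syntax (e.g., d2-d7/a2-a5)."""
--     regs = [r.lower() for r in regs]
--
--     d_regs = sorted([int(r[1]) for r in regs if r.startswith('d')])
--     a_regs = sorted([int(r[1]) for r in regs if r.startswith('a')])
--
--     parts = []
--     if d_regs:
--         parts.append(format_reg_range('d', d_regs))
--     if a_regs:
--         parts.append(format_reg_range('a', a_regs))
--
--     return '/'.join(parts)
--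
-- def format_reg_range(prefix, nums):
--     """Format consecutive register numbers as ranges."""
--     if not nums:
--         return ''
--
--     ranges = []
--     start = nums[0]
--     end = nums[0]
--
--     for n in nums[1:]:
--         if n == end + 1:
--             end = n
--         else:
--             if start == end:
--                 ranges.append(f'{prefix}{start}')
--             else:
--                 ranges.append(f'{prefix}{start}-{prefix}{end}')
--             start = n
--             end = n
--
--     if start == end:
--         ranges.append(f'{prefix}{start}')
--     else:
--         ranges.append(f'{prefix}{start}-{prefix}{end}')
--
--     return '/'.join(ranges)
-- ===== SOURCE B (Python) =====
-- def format_reglist(regs):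
--     """Format a register list for MOVEM in vasm syntax (e.g., d2-d7/a2-a5)."""
--     regs = [r.lower() for r in regs]
--     parts = []
--     for prefix in ('d', 'a'):
--         nums = sorted(int(r[1]) for r in regs if r.startswith(prefix))
--         if nums:
--             parts.append(_runs(prefix, nums))
--     return '/'.join(parts)
--
-- def _runs(prefix, nums):
--     """Split nums into its first maximal consecutive run and recurse on the rest."""
--     i = 1
--     while i < len(nums) and nums[i] == nums[i - 1] + 1:
--         i += 1
--     head = f'{prefix}{nums[0]}' if i == 1 else f'{prefix}{nums[0]}-{prefix}{nums[i - 1]}'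
--     return head if i == len(nums) else head + '/' + _runs(prefix, nums[i:])
-- ===== Notes on version B (the rewrite author's own statement) =====
-- stated objective: alternative
-- what changed: Range collapsing is re-done as a recursive split of the sorted numbers into maximal consecutive runs (peel the leading run, format it, recurse on the rest) instead of A's single scan carrying start/end state and an accumulated ranges list, and the d/a handling becomes one loop over the two prefixes instead of two hard-coded blocks.
import Mathlib
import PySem

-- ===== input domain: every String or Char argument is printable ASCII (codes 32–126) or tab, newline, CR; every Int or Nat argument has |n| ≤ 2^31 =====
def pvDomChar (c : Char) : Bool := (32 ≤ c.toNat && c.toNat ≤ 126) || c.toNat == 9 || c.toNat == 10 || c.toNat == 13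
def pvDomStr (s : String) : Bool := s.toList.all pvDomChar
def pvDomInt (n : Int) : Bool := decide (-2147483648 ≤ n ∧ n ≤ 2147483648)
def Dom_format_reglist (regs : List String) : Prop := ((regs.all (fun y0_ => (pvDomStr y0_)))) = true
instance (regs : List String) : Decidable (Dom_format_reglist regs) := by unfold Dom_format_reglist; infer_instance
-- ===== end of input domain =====

-- B replaces A's accumulator scan (start/end state + ranges list) by a recursive split of the
-- sorted numbers into maximal consecutive runs, and A's two hard-coded prefix branches by one
-- fold over the prefixes; same output, objective: alternative decomposition (no speed claim).

-- int(r[1]) (defaults to 0 where Python would raise; Pre_ excludes those inputs)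
def pvRegNum (r : String) : Int := (((PySem.Str.pyGet? r 1).bind (fun c => PySem.Int.ofStr? (String.ofList [c]))).getD 0)

-- ===== PORT A =====
def format_reg_range (pfx : String) (nums : List Int) : String :=
  match nums with
  | [] => ""
  | n0 :: rest =>
    let st := rest.foldl (fun (acc : List String × Int × Int) n =>
      let (ranges, start, e) := acc
      if n = e + 1 then (ranges, start, n)
      else (ranges ++ [if start = e then pfx ++ PySem.Int.toStr start
                       else pfx ++ PySem.Int.toStr start ++ "-" ++ pfx ++ PySem.Int.toStr e],
            n, n)) ([], n0, n0)
    let (ranges, start, e) := st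
    PySem.Str.join "/" (ranges ++ [if start = e then pfx ++ PySem.Int.toStr start
                                   else pfx ++ PySem.Int.toStr start ++ "-" ++ pfx ++ PySem.Int.toStr e])

def format_reglist (regs : List String) : String :=
  let regs := regs.map PySem.Str.lower
  let d_regs := PySem.List.sorted ((regs.filter (fun r => PySem.Str.startswith r "d")).map pvRegNum) (fun x => x) false
  let a_regs := PySem.List.sorted ((regs.filter (fun r => PySem.Str.startswith r "a")).map pvRegNum) (fun x => x) false
  let parts : List String :=
    (if d_regs.isEmpty then [] else [format_reg_range "d" d_regs]) ++
    (if a_regs.isEmpty then [] else [format_reg_range "a" a_regs])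
  PySem.Str.join "/" parts

-- ===== PORT B =====
-- advance `end`/`rest` through the leading consecutive run (B's while loop)
def pvRun : Int → List Int → Int × List Int
  | e, [] => (e, [])
  | e, n :: t => if n = e + 1 then pvRun n t else (e, n :: t)

theorem pvRun_snd_length_le (e : Int) (l : List Int) : (pvRun e l).2.length ≤ l.length := by
  induction l generalizing e with
  | nil => simp [pvRun]
  | cons n t ih =>
    simp only [pvRun]
    split
    · exact le_trans (ih n) (Nat.le_succ _)
    · simp

def pvRuns (pfx : String) : List Int → String
  | [] => ""
  | n0 :: rest =>
    let p := pvRun n0 rest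
    let head := if p.1 = n0 then pfx ++ PySem.Int.toStr n0
                else pfx ++ PySem.Int.toStr n0 ++ "-" ++ pfx ++ PySem.Int.toStr p.1
    if p.2 = [] then head else head ++ "/" ++ pvRuns pfx p.2
  termination_by nums => nums.length
  decreasing_by
    simpa using Nat.lt_succ_of_le (pvRun_snd_length_le n0 rest)

def format_reglist_alt (regs : List String) : String :=
  let regs := regs.map PySem.Str.lower
  let parts := ["d", "a"].foldl (fun parts pfx =>
    let nums := PySem.List.sorted ((regs.filter (fun r => PySem.Str.startswith r pfx)).map pvRegNum) (fun x => x) false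
    if nums.isEmpty then parts else parts ++ [pvRuns pfx nums]) []
  PySem.Str.join "/" parts

-- ===== PRECONDITION & SPEC =====
-- Pre_ excludes exactly the inputs where Python A raises: a register whose lowercase form starts
-- with 'd' or 'a' but has no digit at index 1 (IndexError / ValueError in int(r[1])).
def Pre_format_reglist (regs : List String) : Prop :=
  ∀ r ∈ regs, (PySem.Str.startswith (PySem.Str.lower r) "d" = true ∨
               PySem.Str.startswith (PySem.Str.lower r) "a" = true) →
    PySem.Chars.strIsdigit ((r.toList.drop 1).take 1) = true
instance (regs : List String) : Decidable (Pre_format_reglist regs) := by unfold Pre_format_reglist; infer_instance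

def pvWitness_format_reglist : List String := ["d2", "D3", "a0", "x7", "a5"]

def Spec_format_reglist (regs : List String) (out : String) : Prop := out = format_reglist_alt regs
instance (regs : List String) (out : String) : Decidable (Spec_format_reglist regs out) := by unfold Spec_format_reglist; infer_instance

-- ===== CLAIM (what is proved, stated in full; the proofs are below) =====
def Claim_equal_format_reglist : Prop := ∀ (regs : List String), Dom_format_reglist regs → Pre_format_reglist regs → Spec_format_reglist regs (format_reglist regs)

-- ===== LEMMAS AND PROOFS =====

-- the formatted string for one closed range (A's repeated if, as a helper for the proofs)
def pvFin (pfx : String) (s e : Int) : String :=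
  if s = e then pfx ++ PySem.Int.toStr s else pfx ++ PySem.Int.toStr s ++ "-" ++ pfx ++ PySem.Int.toStr e

-- A's fold step, named for the proofs (definitionally the lambda in format_reg_range)
def pvStepA (pfx : String) (acc : List String × Int × Int) (n : Int) : List String × Int × Int :=
  let (ranges, start, e) := acc
  if n = e + 1 then (ranges, start, n)
  else (ranges ++ [if start = e then pfx ++ PySem.Int.toStr start
                   else pfx ++ PySem.Int.toStr start ++ "-" ++ pfx ++ PySem.Int.toStr e],
        n, n)

-- the list of range strings produced from state (s, e) over the remaining numbers
def pvRangeList (pfx : String) (s e : Int) : List Int → List String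
  | [] => [pvFin pfx s e]
  | n :: t => if n = e + 1 then pvRangeList pfx s n t else pvFin pfx s e :: pvRangeList pfx n n t

theorem foldA_eq_rangeList (pfx : String) (rest : List Int) (acc : List String) (s e : Int) :
    (rest.foldl (pvStepA pfx) (acc, s, e)).1 ++
      [pvFin pfx (rest.foldl (pvStepA pfx) (acc, s, e)).2.1 (rest.foldl (pvStepA pfx) (acc, s, e)).2.2]
    = acc ++ pvRangeList pfx s e rest := by
  induction rest generalizing acc s e with
  | nil => simp [pvRangeList]
  | cons n t ih =>
    simp only [List.foldl_cons, pvRangeList]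
    by_cases h : n = e + 1
    · simpa [pvStepA, h] using ih acc s n
    · simpa [pvStepA, pvFin, h] using ih (acc ++ [pvFin pfx s e]) n n

theorem rangeList_eq_run (pfx : String) (rest : List Int) (s e : Int) :
    pvRangeList pfx s e rest =
      pvFin pfx s (pvRun e rest).1 ::
        (match (pvRun e rest).2 with
         | [] => []
         | m :: t => pvRangeList pfx m m t) := by
  induction rest generalizing e with
  | nil => simp [pvRangeList, pvRun]
  | cons n t ih =>
    simp only [pvRangeList, pvRun]
    by_cases h : n = e + 1
    · simpa [h] using ih n
    · simp [h]

theorem join_cons (a : String) (l : List String) :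
    PySem.Str.join "/" (a :: l) = if l = [] then a else a ++ "/" ++ PySem.Str.join "/" l := by
  cases l with
  | nil => simp [PySem.Str.join, PySem.Chars.join, List.intercalate]
  | cons b t =>
    apply String.toList_injective
    simp [PySem.Str.toList_join, PySem.Chars.join_cons_cons]

theorem pvRangeList_ne_nil (pfx : String) (s e : Int) (l : List Int) :
    pvRangeList pfx s e l ≠ [] := by
  induction l generalizing s e with
  | nil => simp [pvRangeList]
  | cons n t ih =>
    simp only [pvRangeList]
    split
    · exact ih s n
    · simp

theorem runs_eq_join_rangeList (pfx : String) (nums : List Int) (m : Int) :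
    pvRuns pfx (m :: nums) = PySem.Str.join "/" (pvRangeList pfx m m nums) := by
  induction h : (m :: nums).length using Nat.strong_induction_on generalizing m nums with
  | _ k ih =>
  have hk : nums.length + 1 = k := by simpa using h
  rw [pvRuns, rangeList_eq_run]
  cases hr : (pvRun m nums).2 with
  | nil =>
    by_cases hc : (pvRun m nums).1 = m
    · simp [pvFin, hc, join_cons]
    · simp [pvFin, hc, Ne.symm hc, join_cons]
  | cons m' t' =>
    have hle : (m' :: t').length ≤ nums.length := by
      rw [← hr]; exact pvRun_snd_length_le m nums
    have hlt : (m' :: t').length < k := by simp at hle ⊢; omega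
    rw [join_cons]
    simp only [reduceCtorEq, if_false]
    rw [ih _ hlt t' m' rfl]
    have hne := pvRangeList_ne_nil pfx m' m' t'
    by_cases hc : (pvRun m nums).1 = m
    · simp [pvFin, hc, hne]
    · simp [pvFin, hc, Ne.symm hc, hne]

theorem range_eq_runs (pfx : String) (nums : List Int) :
    format_reg_range pfx nums = pvRuns pfx nums := by
  cases nums with
  | nil => simp [format_reg_range, pvRuns]
  | cons n0 rest =>
    rw [runs_eq_join_rangeList]
    show PySem.Str.join "/"
      ((rest.foldl (pvStepA pfx) ([], n0, n0)).1 ++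
        [if (rest.foldl (pvStepA pfx) ([], n0, n0)).2.1 = (rest.foldl (pvStepA pfx) ([], n0, n0)).2.2
         then pfx ++ PySem.Int.toStr (rest.foldl (pvStepA pfx) ([], n0, n0)).2.1
         else pfx ++ PySem.Int.toStr (rest.foldl (pvStepA pfx) ([], n0, n0)).2.1 ++ "-" ++
              pfx ++ PySem.Int.toStr (rest.foldl (pvStepA pfx) ([], n0, n0)).2.2]) = _
    rw [show (if (rest.foldl (pvStepA pfx) ([], n0, n0)).2.1 = (rest.foldl (pvStepA pfx) ([], n0, n0)).2.2
         then pfx ++ PySem.Int.toStr (rest.foldl (pvStepA pfx) ([], n0, n0)).2.1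
         else pfx ++ PySem.Int.toStr (rest.foldl (pvStepA pfx) ([], n0, n0)).2.1 ++ "-" ++
              pfx ++ PySem.Int.toStr (rest.foldl (pvStepA pfx) ([], n0, n0)).2.2)
        = pvFin pfx (rest.foldl (pvStepA pfx) ([], n0, n0)).2.1 (rest.foldl (pvStepA pfx) ([], n0, n0)).2.2 from rfl]
    rw [foldA_eq_rangeList pfx rest [] n0 n0]
    rfl

-- ===== VERDICT (by name: the statement is the Claim_ definition above) =====
theorem format_reglist_spec : Claim_equal_format_reglist := by
  intro regs _ _
  unfold Spec_format_reglist format_reglist format_reglist_alt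
  simp only [List.foldl_cons, List.foldl_nil]
  rw [range_eq_runs, range_eq_runs]
  set d := PySem.List.sorted (((regs.map PySem.Str.lower).filter (fun r => PySem.Str.startswith r "d")).map pvRegNum) (fun x => x) false
  set a := PySem.List.sorted (((regs.map PySem.Str.lower).filter (fun r => PySem.Str.startswith r "a")).map pvRegNum) (fun x => x) false
  cases d <;> cases a <;> simp
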